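-- pv_equiv track=rewrite | github.com/ThatOtherAndrew/AdventOfCode2023 | 01/part_2_failed.py | transform_digits
-- ===== SOURCE A (Python) =====
-- def transform_digits(line: str) -> str:
--     digits = {
--         'one': '1',
--         'two': '2',
--         'three': '3',
--         'four': '4',
--         'five': '5',
--         'six': '6',
--         'seven': '7',
--         'eight': '8',
--         'nine': '9',
--     }
--
--     indices = []
--
--     for key in digits.keys():
--         for i in range(len(line)):
--             if line.startswith(key, i):
--                 indices.append((i, key))
--
--     if not indices:
--         return line
--
--     indices.sort()
--     line = line.replace(indices[0][1], digits[indices[0][1]], 1)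
--     line = digits[indices[-1][1]].join(line.rsplit(indices[-1][1], 1))
--     return line
-- ===== SOURCE B (Python) =====
-- def transform_digits(line: str) -> str:
--     words = {
--         'one': '1',
--         'two': '2',
--         'three': '3',
--         'four': '4',
--         'five': '5',
--         'six': '6',
--         'seven': '7',
--         'eight': '8',
--         'nine': '9',
--     }
--
--     first = None
--     fi = -1
--     last = None
--     li = -1
--     for w in words:
--         j = line.find(w)
--         if j != -1 and (first is None or j < fi):
--             first = w
--             fi = j
--         k = line.rfind(w)
--         if k != -1 and (last is None or li < k):
--             last = w
--             li = k
--
--     if first is None: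
--         return line
--
--     line = line.replace(first, words[first], 1)
--     j = line.rfind(last)
--     if j != -1:
--         line = line[:j] + words[last] + line[j + len(last):]
--     return line
-- ===== Notes on version B (the rewrite author's own statement) =====
-- stated objective: faster
-- what changed: Instead of testing every spelled digit at every position, collecting all (index, word) matches into a list and sorting it to pick the first and last match, B computes find/rfind once per word (18 scans total) and keeps a running minimum and maximum match index, then performs the same two replacements.
import Mathlib
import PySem

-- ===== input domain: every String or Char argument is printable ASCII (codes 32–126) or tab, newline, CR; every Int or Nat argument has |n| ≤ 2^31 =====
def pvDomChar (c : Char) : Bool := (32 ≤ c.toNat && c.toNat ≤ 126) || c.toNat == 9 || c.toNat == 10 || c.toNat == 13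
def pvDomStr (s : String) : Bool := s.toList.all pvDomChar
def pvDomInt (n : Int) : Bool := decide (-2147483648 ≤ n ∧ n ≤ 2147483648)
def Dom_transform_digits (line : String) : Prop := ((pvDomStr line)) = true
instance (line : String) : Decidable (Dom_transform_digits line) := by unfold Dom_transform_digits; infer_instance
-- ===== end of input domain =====

-- B replaces A's collect-all-matches-then-sort by one find/rfind per spelled digit with a running
-- minimum and maximum match index (objective: faster, as measured — the match list and its sort disappear).

-- the digits dict of both Pythons, keys/values as char lists
def pvDigits : PySem.Dict (List Char) (List Char) :=
  PySem.Dict.mk [("one".toList, "1".toList), ("two".toList, "2".toList), ("three".toList, "3".toList),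
    ("four".toList, "4".toList), ("five".toList, "5".toList), ("six".toList, "6".toList),
    ("seven".toList, "7".toList), ("eight".toList, "8".toList), ("nine".toList, "9".toList)]

-- s.replace(old, new, 1): replace the FIRST occurrence only (count = 1; PySem.Chars.replace has no
-- count parameter, so the count=1 form is ported by hand, exact: occurrence found by find, spliced)
def pvReplaceFirst (s old new : List Char) : List Char :=
  let j := PySem.Chars.find s old
  if j = -1 then s else s.take j.toNat ++ new ++ s.drop (j.toNat + old.length)

-- ===== PORT A =====
-- s.rsplit(sep, 1) for sep ≠ []: split at the LAST occurrence (maxsplit = 1), by hand, exact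
def pvRsplit1 (s sep : List Char) : List (List Char) :=
  let j := PySem.Chars.rfind s sep
  if j = -1 then [s] else [s.take j.toNat, s.drop (j.toNat + sep.length)]

def transform_digits (line : String) : String :=
  let s := line.toList
  let indices : List (Int × List Char) :=
    pvDigits.keys.foldl (fun acc key =>
      (PySem.List.pyRange 0 (PySem.List.len s) 1).foldl (fun acc2 i =>
        -- line.startswith(key, i) with 0 ≤ i: exact as a prefix test on the drop
        if PySem.Chars.startswith (s.drop i.toNat) key then acc2 ++ [(i, key)] else acc2) acc) []
  if indices = [] then line
  else
    -- indices.sort(): Python sorts the (int, str) tuples lexicographically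
    let sorted := PySem.List.sorted2 indices Prod.fst Prod.snd false
    let firstW := (PySem.List.pyGetD sorted 0 (0, [])).2
    let lastW := (PySem.List.pyGetD sorted (-1) (0, [])).2
    let line1 := pvReplaceFirst s firstW (pvDigits.getD firstW [])
    let line2 := PySem.Chars.join (pvDigits.getD lastW []) (pvRsplit1 line1 lastW)
    String.ofList line2

-- ===== PORT B =====
def transform_digits_alt (line : String) : String :=
  let s := line.toList
  let st : Option (List Char) × Int × Option (List Char) × Int :=
    pvDigits.keys.foldl (fun st w =>
      let first := st.1
      let fi := st.2.1
      let last := st.2.2.1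
      let li := st.2.2.2
      let j := PySem.Chars.find s w
      let fl1 := if j ≠ -1 ∧ (first = none ∨ j < fi) then (some w, j) else (first, fi)
      let k := PySem.Chars.rfind s w
      let fl2 := if k ≠ -1 ∧ (last = none ∨ li < k) then (some w, k) else (last, li)
      (fl1.1, fl1.2, fl2.1, fl2.2)) (none, -1, none, -1)
  match st.1, st.2.2.1 with
  | some f, some l =>
    let s1 := pvReplaceFirst s f (pvDigits.getD f [])
    let j := PySem.Chars.rfind s1 l
    let s2 := if j ≠ -1 then s1.take j.toNat ++ (pvDigits.getD l []) ++ s1.drop (j.toNat + l.length) else s1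
    String.ofList s2
  | _, _ => line  -- first is None (and then last is None too): return line unchanged

-- ===== PRECONDITION & SPEC =====
def Spec_transform_digits (line : String) (out : String) : Prop := out = transform_digits_alt line
instance (line : String) (out : String) : Decidable (Spec_transform_digits line out) := by unfold Spec_transform_digits; infer_instance

-- ===== CLAIM (what is proved, stated in full; the proofs are below) =====
def Claim_equal_transform_digits : Prop := ∀ (line : String), Dom_transform_digits line → Spec_transform_digits line (transform_digits line)

-- ===== LEMMAS AND PROOFS =====

-- the comparison sorted2 uses on the (position, word) tuples (Python's tuple <)
def pvBefore (a b : Int × List Char) : Bool :=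
  decide (a.1 < b.1) || (!decide (b.1 < a.1) && decide (a.2 < b.2))

-- the (at most one) spelled digit starting at position i of s
def pvMatch (s : List Char) (i : Nat) : Option (List Char) :=
  pvDigits.keys.find? (fun w => PySem.Chars.startswith (s.drop i) w)

-- the matches of s at positions < m, in increasing position order
def pvL (s : List Char) (m : Nat) : List (Int × List Char) :=
  (List.range m).filterMap (fun i => (pvMatch s i).map (fun w => ((i : Int), w)))

theorem pv_prefix_free : ∀ w1 ∈ pvDigits.keys, ∀ w2 ∈ pvDigits.keys, w1 ≠ w2 → ¬ w1 <+: w2 := by decide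

theorem pv_unique_at (t : List Char) : ∀ w1 ∈ pvDigits.keys, ∀ w2 ∈ pvDigits.keys,
    PySem.Chars.startswith t w1 = true → PySem.Chars.startswith t w2 = true → w1 = w2 := by
  intro w1 h1 w2 h2 hs1 hs2
  by_contra hne
  rw [PySem.Chars.startswith_iff] at hs1 hs2
  rcases List.prefix_or_prefix_of_prefix hs1 hs2 with h | h
  · exact pv_prefix_free w1 h1 w2 h2 hne h
  · exact pv_prefix_free w2 h2 w1 h1 (Ne.symm hne) h

theorem pv_match_some_iff (s : List Char) (i : Nat) (w : List Char) :
    pvMatch s i = some w ↔ w ∈ pvDigits.keys ∧ PySem.Chars.startswith (s.drop i) w = true := by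
  constructor
  · intro h
    exact ⟨List.mem_of_find?_eq_some h, List.find?_some h⟩
  · rintro ⟨hmem, hsw⟩
    cases hf : pvMatch s i with
    | none => exact absurd (List.find?_eq_none.mp hf w hmem) (by simp [hsw])
    | some w' =>
      have heq := pv_unique_at (s.drop i) w' (List.mem_of_find?_eq_some hf) w hmem (List.find?_some hf) hsw
      exact congrArg some heq

-- ----- order facts about pvBefore -----
theorem pvBefore_iff (a b : Int × List Char) :
    pvBefore a b = true ↔ a.1 < b.1 ∨ (¬ b.1 < a.1 ∧ a.2 < b.2) := by
  simp [pvBefore]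

theorem pvBefore_asymm {a b : Int × List Char} (h : pvBefore a b = true) : pvBefore b a = false := by
  rw [pvBefore_iff] at h
  rw [Bool.eq_false_iff, Ne, pvBefore_iff]
  rcases h with h | ⟨h1, h2⟩
  · rintro (h' | ⟨h', _⟩) <;> omega
  · rintro (h' | ⟨_, h'⟩)
    · omega
    · exact absurd h2 (lt_asymm h')

theorem pvBefore_antisymm {a b : Int × List Char} (h1 : pvBefore a b = false)
    (h2 : pvBefore b a = false) : a = b := by
  rw [Bool.eq_false_iff, Ne, pvBefore_iff] at h1 h2
  push Not at h1 h2
  have hi : a.1 = b.1 := le_antisymm h2.1 h1.1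
  have hs : a.2 = b.2 := le_antisymm (h2.2 h1.1) (h1.2 h2.1)
  exact Prod.ext hi hs

theorem pvBefore_lt_of_lt_of_not_lt {x y z : Int × List Char} (h1 : pvBefore x y = true)
    (h2 : pvBefore z y = false) : pvBefore x z = true := by
  rw [pvBefore_iff] at h1 ⊢
  rw [Bool.eq_false_iff, Ne, pvBefore_iff] at h2
  push Not at h2
  rcases h1 with h | ⟨ha, hb⟩
  · exact Or.inl (lt_of_lt_of_le h h2.1)
  · by_cases hxz : x.1 < z.1
    · exact Or.inl hxz
    · have h1' : x.1 ≤ y.1 := not_lt.mp ha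
      have hzy : z.1 ≤ y.1 := le_trans (not_lt.mp hxz) h1'
      exact Or.inr ⟨by omega, lt_of_lt_of_le hb (h2.2 hzy)⟩

-- ----- insertion sort (sorted2) produces the unique strictly pvBefore-increasing rearrangement -----
theorem pv_pairwise_insertBy (x : Int × List Char) (ys : List (Int × List Char))
    (h : ys.Pairwise (fun a b => pvBefore b a = false)) :
    (PySem.List.insertBy pvBefore x ys).Pairwise (fun a b => pvBefore b a = false) := by
  induction ys with
  | nil => simp [PySem.List.insertBy]
  | cons y ys ih =>
    rw [List.pairwise_cons] at h
    rw [show PySem.List.insertBy pvBefore x (y :: ys)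
        = if pvBefore x y = true then x :: y :: ys else y :: PySem.List.insertBy pvBefore x ys from rfl]
    by_cases hxy : pvBefore x y = true
    · rw [if_pos hxy]
      refine List.Pairwise.cons ?_ (List.Pairwise.cons h.1 h.2)
      intro z hz
      rcases List.mem_cons.mp hz with rfl | hz
      · exact pvBefore_asymm hxy
      · exact pvBefore_asymm (pvBefore_lt_of_lt_of_not_lt hxy (h.1 z hz))
    · rw [if_neg hxy]
      refine List.Pairwise.cons ?_ (ih h.2)
      intro z hz
      rcases (PySem.List.mem_insertBy pvBefore x z ys).mp hz with rfl | hz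
      · exact Bool.eq_false_iff.mpr hxy
      · exact h.1 z hz

theorem pv_foldl_insertBy_pairwise (xs acc : List (Int × List Char))
    (h : acc.Pairwise (fun a b => pvBefore b a = false)) :
    (xs.foldl (fun acc x => PySem.List.insertBy pvBefore x acc) acc).Pairwise
      (fun a b => pvBefore b a = false) := by
  induction xs generalizing acc with
  | nil => exact h
  | cons x xs ih => exact ih _ (pv_pairwise_insertBy x acc h)

theorem pv_sorted2_eq_of (xs ys : List (Int × List Char)) (hperm : ys.Perm xs)
    (hys : ys.Pairwise (fun a b => pvBefore a b = true)) :
    PySem.List.sorted2 xs Prod.fst Prod.snd false = ys := by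
  have hpair : (PySem.List.sorted2 xs Prod.fst Prod.snd false).Pairwise
      (fun a b => pvBefore b a = false) := by
    rw [show PySem.List.sorted2 xs Prod.fst Prod.snd false
        = xs.foldl (fun acc x => PySem.List.insertBy pvBefore x acc) [] from rfl]
    exact pv_foldl_insertBy_pairwise xs [] (by simp)
  refine List.Perm.eq_of_pairwise ?_ hpair (hys.imp (fun h => pvBefore_asymm h))
    ((PySem.List.sorted2_perm xs _ _ _).trans hperm.symm)
  intro a b _ _ h1 h2
  exact pvBefore_antisymm h2 h1

-- ----- A's indices list in flatMap form -----
theorem pv_indices_aux (s : List Char) (W : List (List Char)) (acc : List (Int × List Char)) :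
    W.foldl (fun acc key =>
      (PySem.List.pyRange 0 (PySem.List.len s) 1).foldl (fun acc2 i =>
        if PySem.Chars.startswith (s.drop i.toNat) key then acc2 ++ [(i, key)] else acc2) acc) acc
    = acc ++ W.flatMap (fun w =>
        ((List.range s.length).filter (fun i => PySem.Chars.startswith (s.drop i) w)).map
          (fun i : Nat => ((i : Int), w))) := by
  induction W generalizing acc with
  | nil => simp
  | cons w W ih =>
    rw [List.foldl_cons, ih, List.flatMap_cons, ← List.append_assoc]
    congr 1
    rw [show PySem.List.len s = ((s.length : Nat) : Int) by simp,
      PySem.List.pyRange_zero_natCast, List.foldl_map]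
    simp only [Int.toNat_natCast]
    exact PySem.List.foldl_append_if _ _ _ acc

theorem pv_indices_eq (s : List Char) :
    (pvDigits.keys.foldl (fun acc key =>
      (PySem.List.pyRange 0 (PySem.List.len s) 1).foldl (fun acc2 i =>
        if PySem.Chars.startswith (s.drop i.toNat) key then acc2 ++ [(i, key)] else acc2) acc) [])
    = pvDigits.keys.flatMap (fun w =>
        ((List.range s.length).filter (fun i => PySem.Chars.startswith (s.drop i) w)).map
          (fun i : Nat => ((i : Int), w))) := by
  simpa using pv_indices_aux s pvDigits.keys []

theorem pv_mem_indices (s : List Char) (p : Int × List Char) :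
    p ∈ pvDigits.keys.flatMap (fun w =>
        ((List.range s.length).filter (fun i => PySem.Chars.startswith (s.drop i) w)).map
          (fun i : Nat => ((i : Int), w)))
    ↔ ∃ i : Nat, i < s.length ∧ p.1 = (i : Int) ∧ pvMatch s i = some p.2 := by
  simp only [List.mem_flatMap, List.mem_map, List.mem_filter, List.mem_range]
  constructor
  · rintro ⟨w, hw, i, ⟨hi, hs⟩, rfl⟩
    exact ⟨i, hi, rfl, (pv_match_some_iff s i w).mpr ⟨hw, hs⟩⟩
  · rintro ⟨i, hi, h1, hm⟩
    obtain ⟨hw, hs⟩ := (pv_match_some_iff s i p.2).mp hm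
    refine ⟨p.2, hw, i, ⟨hi, hs⟩, ?_⟩
    exact Prod.ext h1.symm rfl

theorem pv_mem_L (s : List Char) (p : Int × List Char) :
    p ∈ pvL s s.length ↔ ∃ i : Nat, i < s.length ∧ p.1 = (i : Int) ∧ pvMatch s i = some p.2 := by
  rw [pvL]
  simp only [List.mem_filterMap, List.mem_range, Option.map_eq_some_iff]
  constructor
  · rintro ⟨i, hi, w, hm, rfl⟩
    exact ⟨i, hi, rfl, hm⟩
  · rintro ⟨i, hi, h1, hm⟩
    exact ⟨i, hi, p.2, hm, Prod.ext h1.symm rfl⟩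

theorem pv_L_pairwise (s : List Char) (m : Nat) :
    (pvL s m).Pairwise (fun a b => a.1 < b.1) := by
  rw [pvL, List.pairwise_filterMap]
  refine List.pairwise_lt_range.imp ?_
  intro i j hij b hb b' hb'
  obtain ⟨w, _, rfl⟩ := Option.map_eq_some_iff.mp hb
  obtain ⟨w', _, rfl⟩ := Option.map_eq_some_iff.mp hb'
  simpa using hij

theorem pv_L_nodup (s : List Char) (m : Nat) : (pvL s m).Nodup := by
  refine (pv_L_pairwise s m).imp ?_
  intro a b h
  exact fun he => by rw [he] at h; omega

theorem pv_indices_nodup (s : List Char) :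
    (pvDigits.keys.flatMap (fun w =>
        ((List.range s.length).filter (fun i => PySem.Chars.startswith (s.drop i) w)).map
          (fun i : Nat => ((i : Int), w)))).Nodup := by
  rw [List.nodup_flatMap]
  constructor
  · intro w _
    refine List.Nodup.map ?_ (List.nodup_range.filter _)
    intro a b hab
    have h' : ((a : Nat) : Int) = ((b : Nat) : Int) := congrArg Prod.fst hab
    exact_mod_cast h'
  · have hnd : pvDigits.keys.Nodup := by decide
    refine hnd.imp ?_
    intro w1 w2 hne p hp1 hp2
    simp only [List.mem_map, List.mem_filter] at hp1 hp2
    obtain ⟨i1, _, rfl⟩ := hp1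
    obtain ⟨i2, _, heq⟩ := hp2
    exact hne (congrArg Prod.snd heq).symm

theorem pv_perm (s : List Char) :
    (pvL s s.length).Perm (pvDigits.keys.flatMap (fun w =>
        ((List.range s.length).filter (fun i => PySem.Chars.startswith (s.drop i) w)).map
          (fun i : Nat => ((i : Int), w)))) := by
  rw [List.perm_ext_iff_of_nodup (pv_L_nodup s s.length) (pv_indices_nodup s)]
  intro p
  rw [pv_mem_L, pv_mem_indices]

-- ----- B's scan over the nine words: find/rfind with running min/max -----
-- the step of B's loop
def pvScanStep (s : List Char) (st : Option (List Char) × Int × Option (List Char) × Int)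
    (w : List Char) : Option (List Char) × Int × Option (List Char) × Int :=
  let first := st.1
  let fi := st.2.1
  let last := st.2.2.1
  let li := st.2.2.2
  let j := PySem.Chars.find s w
  let fl1 := if j ≠ -1 ∧ (first = none ∨ j < fi) then (some w, j) else (first, fi)
  let k := PySem.Chars.rfind s w
  let fl2 := if k ≠ -1 ∧ (last = none ∨ li < k) then (some w, k) else (last, li)
  (fl1.1, fl1.2, fl2.1, fl2.2)

-- invariants of the scan after processing the words of W
def pvFInv (s : List Char) (W : List (List Char)) (first : Option (List Char)) (fi : Int) : Prop :=
  (first = none ∧ fi = -1 ∧ ∀ w ∈ W, PySem.Chars.find s w = -1) ∨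
  (∃ w ∈ W, first = some w ∧ fi = PySem.Chars.find s w ∧ 0 ≤ fi ∧
    ∀ w' ∈ W, w' ≠ w → PySem.Chars.find s w' = -1 ∨ fi < PySem.Chars.find s w')

def pvLInv (s : List Char) (W : List (List Char)) (last : Option (List Char)) (li : Int) : Prop :=
  (last = none ∧ li = -1 ∧ ∀ w ∈ W, PySem.Chars.rfind s w = -1) ∨
  (∃ w ∈ W, last = some w ∧ li = PySem.Chars.rfind s w ∧ 0 ≤ li ∧
    ∀ w' ∈ W, w' ≠ w → PySem.Chars.rfind s w' = -1 ∨ PySem.Chars.rfind s w' < li)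

theorem pv_keys_ne_nil : ∀ w ∈ pvDigits.keys, w ≠ [] := by decide

theorem pv_occ_lt_len {s w : List Char} {i : Nat} (hw : w ≠ []) (hp : w <+: s.drop i) :
    i < s.length := by
  by_contra h
  rw [List.drop_eq_nil_of_le (by omega)] at hp
  exact hw (List.prefix_nil.mp hp)

-- first-occurrence characterisation of find (from the library spec)
theorem pv_find_spec (s w : List Char) (_hw : w ≠ []) :
    (PySem.Chars.find s w = -1 ∧ ∀ j : Nat, ¬ w <+: s.drop j) ∨
    (∃ j : Nat, PySem.Chars.find s w = (j : Int) ∧ w <+: s.drop j ∧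
      ∀ i : Nat, i < j → ¬ w <+: s.drop i) := by
  rcases eq_or_lt_of_le (PySem.Chars.neg_one_le_find s w) with h | h
  · left
    refine ⟨h.symm, fun j hp => ?_⟩
    have hinf : ¬ w <:+: s := (PySem.Chars.find_eq_neg_one_iff s w).mp h.symm
    have hin : PySem.Chars.isIn w s = true := (PySem.Chars.exists_prefix_drop_iff_isIn w s).mp ⟨j, hp⟩
    exact hinf ((PySem.Chars.isIn_iff_infix w s).mp hin)
  · right
    have h0 : 0 ≤ PySem.Chars.find s w := by omega
    obtain ⟨h1, h2⟩ := PySem.Chars.find_spec h0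
    exact ⟨(PySem.Chars.find s w).toNat, by omega, h1, h2⟩

-- last-occurrence characterisation of rfind (PySem states no spec lemma for rfind, so this
-- is proved from its definition by induction on the scan bound)
theorem pv_rfind_go_spec (s w : List Char) (k : Nat) :
    (PySem.Chars.rfind.go s w k = -1 ∧ ∀ j : Nat, j ≤ k → ¬ w <+: s.drop j) ∨
    (∃ j : Nat, j ≤ k ∧ PySem.Chars.rfind.go s w k = (j : Int) ∧ w <+: s.drop j ∧
      ∀ i : Nat, j < i → i ≤ k → ¬ w <+: s.drop i) := by
  induction k with
  | zero =>
    rw [show PySem.Chars.rfind.go s w 0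
        = (if w.isPrefixOf s = true then 0 else -1) from rfl]
    by_cases hp : w.isPrefixOf s = true
    · right
      refine ⟨0, le_refl 0, by rw [if_pos hp]; simp, ?_, fun i h1 h2 => by omega⟩
      simpa using List.isPrefixOf_iff_prefix.mp hp
    · left
      refine ⟨by rw [if_neg hp], fun j hj => ?_⟩
      interval_cases j
      simpa using fun h => hp (List.isPrefixOf_iff_prefix.mpr (by simpa using h))
  | succ k ih =>
    rw [show PySem.Chars.rfind.go s w (k + 1)
        = (if w.isPrefixOf (s.drop (k + 1)) = true then ((k + 1 : Nat) : Int)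
           else PySem.Chars.rfind.go s w k) from rfl]
    by_cases hp : w.isPrefixOf (s.drop (k + 1)) = true
    · right
      refine ⟨k + 1, le_refl _, by rw [if_pos hp], List.isPrefixOf_iff_prefix.mp hp,
        fun i h1 h2 => by omega⟩
    · rw [if_neg hp]
      have hnp : ¬ w <+: s.drop (k + 1) :=
        fun h => hp (List.isPrefixOf_iff_prefix.mpr h)
      rcases ih with ⟨h1, h2⟩ | ⟨j, hj, h1, h2, h3⟩
      · left
        refine ⟨h1, fun j hj => ?_⟩
        rcases Nat.lt_or_ge j (k + 1) with h | h
        · exact h2 j (by omega)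
        · have : j = k + 1 := by omega
          exact this ▸ hnp
      · right
        refine ⟨j, by omega, h1, h2, fun i hi1 hi2 => ?_⟩
        rcases Nat.lt_or_ge i (k + 1) with h | h
        · exact h3 i hi1 (by omega)
        · have : i = k + 1 := by omega
          exact this ▸ hnp

theorem pv_rfind_spec (s w : List Char) (hw : w ≠ []) :
    (PySem.Chars.rfind s w = -1 ∧ ∀ j : Nat, ¬ w <+: s.drop j) ∨
    (∃ j : Nat, PySem.Chars.rfind s w = (j : Int) ∧ w <+: s.drop j ∧
      ∀ i : Nat, j < i → ¬ w <+: s.drop i) := by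
  rcases pv_rfind_go_spec s w s.length with ⟨h1, h2⟩ | ⟨j, hj, h1, h2, h3⟩
  · left
    refine ⟨h1, fun j => ?_⟩
    rcases Nat.lt_or_ge j (s.length + 1) with h | h
    · exact h2 j (by omega)
    · intro hp
      exact absurd (pv_occ_lt_len hw hp) (by omega)
  · right
    refine ⟨j, h1, h2, fun i hi => ?_⟩
    rcases Nat.lt_or_ge i (s.length + 1) with h | h
    · exact h3 i hi (by omega)
    · intro hp
      exact absurd (pv_occ_lt_len hw hp) (by omega)

-- distinct keys never share a first (or last) occurrence index
theorem pv_find_unique {s w1 w2 : List Char} (h1 : w1 ∈ pvDigits.keys) (h2 : w2 ∈ pvDigits.keys)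
    {i : Nat} (hp1 : w1 <+: s.drop i) (hp2 : w2 <+: s.drop i) : w1 = w2 :=
  pv_unique_at (s.drop i) w1 h1 w2 h2 ((PySem.Chars.startswith_iff _ _).mpr hp1)
    ((PySem.Chars.startswith_iff _ _).mpr hp2)

-- max of a strictly position-sorted list is its last element
theorem pv_getLast_max (l : List (Int × List Char)) (hl : l.Pairwise (fun a b => a.1 < b.1))
    (m : Int × List Char) (hm : l.getLast? = some m) : ∀ q ∈ l, q.1 ≤ m.1 := by
  induction l with
  | nil => simp at hm
  | cons p t ih =>
    rw [List.pairwise_cons] at hl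
    intro q hq
    cases t with
    | nil =>
      simp at hq hm
      subst hq
      subst hm
      exact le_refl _
    | cons a b =>
      rw [List.getLast?_cons_cons] at hm
      rcases List.mem_cons.mp hq with rfl | hq
      · have hmm : m ∈ a :: b := List.mem_of_getLast? hm
        exact le_of_lt (hl.1 _ hmm)
      · exact ih hl.2 hm q hq

-- position/word of the head of pvL: its word has the globally smallest find, strictly
theorem pv_first_char (s : List Char) (p : Int × List Char) (t : List (Int × List Char))
    (hL : pvL s s.length = p :: t) :
    PySem.Chars.find s p.2 = p.1 ∧ ∀ w ∈ pvDigits.keys, w ≠ p.2 →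
      PySem.Chars.find s w = -1 ∨ p.1 < PySem.Chars.find s w := by
  have hpmem : p ∈ pvL s s.length := by rw [hL]; exact List.mem_cons_self
  obtain ⟨i0, hi0, hp1, hm⟩ := (pv_mem_L s p).mp hpmem
  obtain ⟨hk0, hs0⟩ := (pv_match_some_iff s i0 p.2).mp hm
  have hw0 : p.2 ≠ [] := pv_keys_ne_nil p.2 hk0
  have hocc0 : p.2 <+: s.drop i0 := (PySem.Chars.startswith_iff _ _).mp hs0
  have hmin : ∀ (j : Nat) (w : List Char), w ∈ pvDigits.keys → w <+: s.drop j → (i0 : Int) ≤ j := by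
    intro j w hwk hwp
    have hjlen : j < s.length := pv_occ_lt_len (pv_keys_ne_nil w hwk) hwp
    have hmem : ((j : Int), w) ∈ pvL s s.length := (pv_mem_L s ((j : Int), w)).mpr
      ⟨j, hjlen, rfl, (pv_match_some_iff s j w).mpr ⟨hwk, (PySem.Chars.startswith_iff _ _).mpr hwp⟩⟩
    rw [hL] at hmem
    have hpw := pv_L_pairwise s s.length
    rw [hL, List.pairwise_cons] at hpw
    rcases List.mem_cons.mp hmem with heq | hmem
    · have h1 : (j : Int) = p.1 := congrArg Prod.fst heq
      omega
    · have h2 : p.1 < (j : Int) := hpw.1 _ hmem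
      omega
  constructor
  · rcases pv_find_spec s p.2 hw0 with ⟨_, h⟩ | ⟨j, h1, h2, h3⟩
    · exact absurd hocc0 (h i0)
    · have hji : (i0 : Int) ≤ j := hmin j p.2 hk0 h2
      have hij : ¬ i0 < j := fun hc => h3 i0 hc hocc0
      have : j = i0 := by omega
      rw [h1, hp1, this]
  · intro w hwk hwne
    rcases pv_find_spec s w (pv_keys_ne_nil w hwk) with ⟨h, _⟩ | ⟨j, h1, h2, _⟩
    · exact Or.inl h
    · right
      have hji : (i0 : Int) ≤ j := hmin j w hwk h2
      have : j ≠ i0 := by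
        intro hc
        subst hc
        exact hwne (pv_find_unique hwk hk0 h2 hocc0)
      rw [h1, hp1]
      omega

-- position/word of the last of pvL: its word has the globally largest rfind, strictly
theorem pv_last_char (s : List Char) (p : Int × List Char) (t : List (Int × List Char))
    (hL : pvL s s.length = p :: t) :
    PySem.Chars.rfind s ((p :: t).getLast (by simp)).2 = ((p :: t).getLast (by simp)).1 ∧
    ∀ w ∈ pvDigits.keys, w ≠ ((p :: t).getLast (by simp)).2 →
      PySem.Chars.rfind s w = -1 ∨ PySem.Chars.rfind s w < ((p :: t).getLast (by simp)).1 := by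
  set q := (p :: t).getLast (by simp) with hq
  have hqmem : q ∈ pvL s s.length := by rw [hL]; exact List.getLast_mem _
  obtain ⟨i1, hi1, hq1, hm⟩ := (pv_mem_L s q).mp hqmem
  obtain ⟨hk1, hs1⟩ := (pv_match_some_iff s i1 q.2).mp hm
  have hw1 : q.2 ≠ [] := pv_keys_ne_nil q.2 hk1
  have hocc1 : q.2 <+: s.drop i1 := (PySem.Chars.startswith_iff _ _).mp hs1
  have hmax : ∀ (j : Nat) (w : List Char), w ∈ pvDigits.keys → w <+: s.drop j → (j : Int) ≤ i1 := by
    intro j w hwk hwp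
    have hjlen : j < s.length := pv_occ_lt_len (pv_keys_ne_nil w hwk) hwp
    have hmem : ((j : Int), w) ∈ pvL s s.length := (pv_mem_L s ((j : Int), w)).mpr
      ⟨j, hjlen, rfl, (pv_match_some_iff s j w).mpr ⟨hwk, (PySem.Chars.startswith_iff _ _).mpr hwp⟩⟩
    have hsome : (pvL s s.length).getLast? = some q := by
      rw [hq, hL, List.getLast?_eq_some_getLast (List.cons_ne_nil p t)]
    have := pv_getLast_max (pvL s s.length) (pv_L_pairwise s s.length) q hsome _ hmem
    have h2 : (j : Int) ≤ q.1 := this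
    omega
  constructor
  · rcases pv_rfind_spec s q.2 hw1 with ⟨_, h⟩ | ⟨j, h1, h2, h3⟩
    · exact absurd hocc1 (h i1)
    · have hji : (j : Int) ≤ i1 := hmax j q.2 hk1 h2
      have hij : ¬ j < i1 := fun hc => h3 i1 hc hocc1
      have : j = i1 := by omega
      rw [h1, hq1, this]
  · intro w hwk hwne
    rcases pv_rfind_spec s w (pv_keys_ne_nil w hwk) with ⟨h, _⟩ | ⟨j, h1, h2, _⟩
    · exact Or.inl h
    · right
      have hji : (j : Int) ≤ i1 := hmax j w hwk h2
      have : j ≠ i1 := by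
        intro hc
        subst hc
        exact hwne (pv_find_unique hwk hk1 h2 hocc1)
      rw [h1, hq1]
      omega

theorem pv_scan_inv (s : List Char) (W Wdone : List (List Char))
    (hnd : (Wdone ++ W).Nodup) (hk : ∀ w ∈ Wdone ++ W, w ∈ pvDigits.keys)
    (st : Option (List Char) × Int × Option (List Char) × Int)
    (hF : pvFInv s Wdone st.1 st.2.1) (hLi : pvLInv s Wdone st.2.2.1 st.2.2.2) :
    pvFInv s (Wdone ++ W) (W.foldl (pvScanStep s) st).1 (W.foldl (pvScanStep s) st).2.1 ∧
    pvLInv s (Wdone ++ W) (W.foldl (pvScanStep s) st).2.2.1 (W.foldl (pvScanStep s) st).2.2.2 := by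
  induction W generalizing Wdone st with
  | nil => simpa using ⟨hF, hLi⟩
  | cons w W ih =>
    have hwk : w ∈ pvDigits.keys := hk w (by simp)
    have hwnew : w ∉ Wdone := by
      intro hc
      exact (List.disjoint_of_nodup_append hnd) hc (by simp)
    have hstep : pvFInv s (Wdone ++ [w]) (pvScanStep s st w).1 (pvScanStep s st w).2.1 ∧
        pvLInv s (Wdone ++ [w]) (pvScanStep s st w).2.2.1 (pvScanStep s st w).2.2.2 := by
      constructor
      · -- first/fi component
        show pvFInv s (Wdone ++ [w])
          (if PySem.Chars.find s w ≠ -1 ∧ (st.1 = none ∨ PySem.Chars.find s w < st.2.1)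
            then ((some w : Option (List Char)), PySem.Chars.find s w) else (st.1, st.2.1)).1
          (if PySem.Chars.find s w ≠ -1 ∧ (st.1 = none ∨ PySem.Chars.find s w < st.2.1)
            then ((some w : Option (List Char)), PySem.Chars.find s w) else (st.1, st.2.1)).2
        by_cases hc : PySem.Chars.find s w ≠ -1 ∧ (st.1 = none ∨ PySem.Chars.find s w < st.2.1)
        · rw [if_pos hc]
          right
          have hj0 : 0 ≤ PySem.Chars.find s w := by
            have := PySem.Chars.neg_one_le_find s w
            omega
          refine ⟨w, by simp, rfl, rfl, hj0, ?_⟩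
          intro w' hw' hne
          rcases List.mem_append.mp hw' with hw' | hw'
          · rcases hF with ⟨_, _, hall⟩ | ⟨w0, hw0, he1, he2, _, hdom⟩
            · exact Or.inl (hall w' hw')
            · rcases hc.2 with hnone | hlt
              · rw [he1] at hnone; exact absurd hnone (by simp)
              · rw [he2] at hlt
                by_cases hne0 : w' = w0
                · subst hne0; exact Or.inr hlt
                · rcases hdom w' hw' hne0 with h | h
                  · exact Or.inl h
                  · rw [he2] at h; exact Or.inr (lt_trans hlt h)
          · simp at hw'
            exact absurd hw' hne
        · rw [if_neg hc]
          rcases hF with ⟨he1, he2, hall⟩ | ⟨w0, hw0, he1, he2, he3, hdom⟩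
          · left
            refine ⟨he1, he2, ?_⟩
            intro w' hw'
            rcases List.mem_append.mp hw' with hw' | hw'
            · exact hall w' hw'
            · simp at hw'
              subst hw'
              by_contra hne
              exact hc ⟨hne, Or.inl he1⟩
          · right
            refine ⟨w0, List.mem_append.mpr (Or.inl hw0), he1, he2, he3, ?_⟩
            intro w' hw' hne
            rcases List.mem_append.mp hw' with hw' | hw'
            · exact hdom w' hw' hne
            · simp at hw'
              subst hw'
              by_cases hj : PySem.Chars.find s w' = -1
              · exact Or.inl hj
              · right
                have hnlt : ¬ PySem.Chars.find s w' < st.2.1 := by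
                  intro hlt
                  exact hc ⟨hj, Or.inr hlt⟩
                have hne' : st.2.1 ≠ PySem.Chars.find s w' := by
                  intro heq
                  have h0 : 0 ≤ PySem.Chars.find s w' := by rw [← heq]; exact he3
                  rcases pv_find_spec s w' (pv_keys_ne_nil w' hwk) with ⟨hneg, _⟩ | ⟨j, h1, h2, _⟩
                  · exact hj hneg
                  · rcases pv_find_spec s w0 (pv_keys_ne_nil w0 (hk w0
                        (List.mem_append.mpr (Or.inl hw0)))) with ⟨hneg, _⟩ | ⟨j0, g1, g2, _⟩
                    · rw [he2] at he3; rw [hneg] at he3; omega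
                    · have : j0 = j := by
                        rw [he2, g1] at heq
                        rw [h1] at heq
                        exact_mod_cast heq
                      subst this
                      exact hwnew (pv_find_unique hwk (hk w0
                        (List.mem_append.mpr (Or.inl hw0))) h2 g2 ▸ hw0)
                omega
      · -- last/li component
        show pvLInv s (Wdone ++ [w])
          (if PySem.Chars.rfind s w ≠ -1 ∧ (st.2.2.1 = none ∨ st.2.2.2 < PySem.Chars.rfind s w)
            then ((some w : Option (List Char)), PySem.Chars.rfind s w) else (st.2.2.1, st.2.2.2)).1
          (if PySem.Chars.rfind s w ≠ -1 ∧ (st.2.2.1 = none ∨ st.2.2.2 < PySem.Chars.rfind s w)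
            then ((some w : Option (List Char)), PySem.Chars.rfind s w) else (st.2.2.1, st.2.2.2)).2
        by_cases hc : PySem.Chars.rfind s w ≠ -1 ∧ (st.2.2.1 = none ∨ st.2.2.2 < PySem.Chars.rfind s w)
        · rw [if_pos hc]
          right
          have hj0 : 0 ≤ PySem.Chars.rfind s w := by
            rcases pv_rfind_spec s w (pv_keys_ne_nil w hwk) with ⟨hneg, _⟩ | ⟨j, h1, _, _⟩
            · exact absurd hneg hc.1
            · rw [h1]; omega
          refine ⟨w, by simp, rfl, rfl, hj0, ?_⟩
          intro w' hw' hne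
          rcases List.mem_append.mp hw' with hw' | hw'
          · rcases hLi with ⟨_, _, hall⟩ | ⟨w0, hw0, he1, he2, _, hdom⟩
            · exact Or.inl (hall w' hw')
            · rcases hc.2 with hnone | hlt
              · rw [he1] at hnone; exact absurd hnone (by simp)
              · rw [he2] at hlt
                by_cases hne0 : w' = w0
                · subst hne0; exact Or.inr hlt
                · rcases hdom w' hw' hne0 with h | h
                  · exact Or.inl h
                  · rw [he2] at h; exact Or.inr (lt_trans h hlt)
          · simp at hw'
            exact absurd hw' hne
        · rw [if_neg hc]
          rcases hLi with ⟨he1, he2, hall⟩ | ⟨w0, hw0, he1, he2, he3, hdom⟩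
          · left
            refine ⟨he1, he2, ?_⟩
            intro w' hw'
            rcases List.mem_append.mp hw' with hw' | hw'
            · exact hall w' hw'
            · simp at hw'
              subst hw'
              by_contra hne
              exact hc ⟨hne, Or.inl he1⟩
          · right
            refine ⟨w0, List.mem_append.mpr (Or.inl hw0), he1, he2, he3, ?_⟩
            intro w' hw' hne
            rcases List.mem_append.mp hw' with hw' | hw'
            · exact hdom w' hw' hne
            · simp at hw'
              subst hw'
              by_cases hj : PySem.Chars.rfind s w' = -1
              · exact Or.inl hj
              · right
                have hnlt : ¬ st.2.2.2 < PySem.Chars.rfind s w' := by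
                  intro hlt
                  exact hc ⟨hj, Or.inr hlt⟩
                have hne' : st.2.2.2 ≠ PySem.Chars.rfind s w' := by
                  intro heq
                  rcases pv_rfind_spec s w' (pv_keys_ne_nil w' hwk) with ⟨hneg, _⟩ | ⟨j, h1, h2, _⟩
                  · exact hj hneg
                  · rcases pv_rfind_spec s w0 (pv_keys_ne_nil w0 (hk w0
                        (List.mem_append.mpr (Or.inl hw0)))) with ⟨hneg, _⟩ | ⟨j0, g1, g2, _⟩
                    · rw [he2] at he3; rw [hneg] at he3; omega
                    · have : j0 = j := by
                        rw [he2, g1] at heq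
                        rw [h1] at heq
                        exact_mod_cast heq
                      subst this
                      exact hwnew (pv_find_unique hwk (hk w0
                        (List.mem_append.mpr (Or.inl hw0))) h2 g2 ▸ hw0)
                omega
    rw [List.foldl_cons]
    have := ih (Wdone ++ [w]) (by simpa using hnd)
      (by intro x hx; apply hk; simpa using hx) (pvScanStep s st w) hstep.1 hstep.2
    simpa using this

theorem pv_scan_first_last (s : List Char) :
    (pvDigits.keys.foldl (pvScanStep s) (none, -1, none, -1)).1
      = (pvL s s.length).head?.map Prod.snd ∧
    (pvDigits.keys.foldl (pvScanStep s) (none, -1, none, -1)).2.2.1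
      = (pvL s s.length).getLast?.map Prod.snd := by
  have hinv := pv_scan_inv s pvDigits.keys [] (by decide) (by intro w hw; simpa using hw)
    (none, -1, none, -1) (Or.inl ⟨rfl, rfl, by simp⟩) (Or.inl ⟨rfl, rfl, by simp⟩)
  rw [List.nil_append] at hinv
  cases hL : pvL s s.length with
  | nil =>
    have hocc : ∀ w ∈ pvDigits.keys, ∀ j : Nat, ¬ w <+: s.drop j := by
      intro w hwk j hp
      have hjlen : j < s.length := pv_occ_lt_len (pv_keys_ne_nil w hwk) hp
      have : ((j : Int), w) ∈ pvL s s.length := (pv_mem_L s ((j : Int), w)).mpr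
        ⟨j, hjlen, rfl, (pv_match_some_iff s j w).mpr ⟨hwk, (PySem.Chars.startswith_iff _ _).mpr hp⟩⟩
      rw [hL] at this
      simp at this
    constructor
    · rcases hinv.1 with ⟨he1, _, _⟩ | ⟨w0, hw0, _, he2, he3, _⟩
      · simp [he1]
      · rcases pv_find_spec s w0 (pv_keys_ne_nil w0 hw0) with ⟨hneg, _⟩ | ⟨j, h1, h2, _⟩
        · omega
        · exact absurd h2 (hocc w0 hw0 j)
    · rcases hinv.2 with ⟨he1, _, _⟩ | ⟨w0, hw0, _, he2, he3, _⟩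
      · simp [he1]
      · rcases pv_rfind_spec s w0 (pv_keys_ne_nil w0 hw0) with ⟨hneg, _⟩ | ⟨j, h1, h2, _⟩
        · omega
        · exact absurd h2 (hocc w0 hw0 j)
  | cons p t =>
    obtain ⟨hf1, hf2⟩ := pv_first_char s p t hL
    obtain ⟨hl1, hl2⟩ := pv_last_char s p t hL
    have hp0 : 0 ≤ p.1 := by
      obtain ⟨i0, _, hp1, _⟩ := (pv_mem_L s p).mp (by rw [hL]; exact List.mem_cons_self)
      rw [hp1]; omega
    have hpk : p.2 ∈ pvDigits.keys := by
      obtain ⟨i0, _, _, hm⟩ := (pv_mem_L s p).mp (by rw [hL]; exact List.mem_cons_self)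
      exact ((pv_match_some_iff s i0 p.2).mp hm).1
    have hq0 : 0 ≤ ((p :: t).getLast (by simp)).1 := by
      obtain ⟨i1, _, hq1, _⟩ := (pv_mem_L s ((p :: t).getLast (by simp))).mp
        (by rw [hL]; exact List.getLast_mem _)
      rw [hq1]; omega
    have hqk : ((p :: t).getLast (by simp)).2 ∈ pvDigits.keys := by
      obtain ⟨i1, _, _, hm⟩ := (pv_mem_L s ((p :: t).getLast (by simp))).mp
        (by rw [hL]; exact List.getLast_mem _)
      exact ((pv_match_some_iff s i1 _).mp hm).1
    constructor
    · rcases hinv.1 with ⟨_, _, hall⟩ | ⟨w0, hw0, he1, he2, he3, hdom⟩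
      · have := hall p.2 hpk
        rw [hf1] at this
        omega
      · have hweq : w0 = p.2 := by
          by_contra hne
          rcases hf2 w0 hw0 hne with h | h
          · omega
          · rcases hdom p.2 hpk (fun hc => hne hc.symm) with h' | h' <;> omega
        rw [he1, hweq]
        simp
    · rcases hinv.2 with ⟨_, _, hall⟩ | ⟨w0, hw0, he1, he2, he3, hdom⟩
      · have := hall ((p :: t).getLast (by simp)).2 hqk
        rw [hl1] at this
        omega
      · have hweq : w0 = ((p :: t).getLast (by simp)).2 := by
          by_contra hne
          rcases hl2 w0 hw0 hne with h | h
          · omega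
          · rcases hdom _ hqk (fun hc => hne hc.symm) with h' | h' <;> omega
        rw [he1, hweq, List.getLast?_eq_some_getLast (List.cons_ne_nil p t)]
        rfl

-- ----- final assembly -----
theorem pv_last_step (s1 lw d : List Char) :
    PySem.Chars.join d (pvRsplit1 s1 lw)
    = (if PySem.Chars.rfind s1 lw ≠ -1
        then s1.take (PySem.Chars.rfind s1 lw).toNat ++ d
          ++ s1.drop ((PySem.Chars.rfind s1 lw).toNat + lw.length)
        else s1) := by
  simp only [pvRsplit1]
  by_cases hj : PySem.Chars.rfind s1 lw = -1
  · simp [hj, PySem.Chars.join_singleton]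
  · simp [hj, PySem.Chars.join_cons_cons, PySem.Chars.join_singleton]

theorem transform_digits_spec : Claim_equal_transform_digits := by
  intro line _
  show transform_digits line = transform_digits_alt line
  simp only [transform_digits, transform_digits_alt]
  rw [pv_indices_eq line.toList]
  have hBfold : (pvDigits.keys.foldl (fun st w =>
      let first := st.1
      let fi := st.2.1
      let last := st.2.2.1
      let li := st.2.2.2
      let j := PySem.Chars.find line.toList w
      let fl1 := if j ≠ -1 ∧ (first = none ∨ j < fi) then (some w, j) else (first, fi)
      let k := PySem.Chars.rfind line.toList w
      let fl2 := if k ≠ -1 ∧ (last = none ∨ li < k) then (some w, k) else (last, li)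
      (fl1.1, fl1.2, fl2.1, fl2.2)) ((none : Option (List Char)), (-1 : Int),
        (none : Option (List Char)), (-1 : Int)))
      = pvDigits.keys.foldl (pvScanStep line.toList) (none, -1, none, -1) := rfl
  rw [hBfold]
  obtain ⟨hfirst, hlast⟩ := pv_scan_first_last line.toList
  rw [hfirst, hlast]
  have hperm := pv_perm line.toList
  cases hL : pvL line.toList line.toList.length with
  | nil =>
    rw [hL] at hperm
    have hnil := hperm.symm.eq_nil
    rw [if_pos hnil]
    rfl
  | cons p t =>
    rw [hL] at hperm
    have hne : pvDigits.keys.flatMap (fun w =>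
        ((List.range line.toList.length).filter
          (fun i => PySem.Chars.startswith (line.toList.drop i) w)).map
          (fun i : Nat => ((i : Int), w))) ≠ [] := by
      intro h
      rw [h] at hperm
      exact absurd hperm.eq_nil (by simp)
    rw [if_neg hne]
    have hpw : (p :: t).Pairwise (fun a b => pvBefore a b = true) := by
      have := pv_L_pairwise line.toList line.toList.length
      rw [hL] at this
      exact this.imp (fun h => (pvBefore_iff _ _).mpr (Or.inl h))
    rw [pv_sorted2_eq_of _ _ hperm hpw]
    rw [PySem.List.pyGetD_zero_cons,
      PySem.List.pyGetD_neg_one (p :: t) ((0 : Int), ([] : List Char)) (List.cons_ne_nil p t)]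
    rw [List.head?_cons, List.getLast?_eq_some_getLast (List.cons_ne_nil p t)]
    show String.ofList (PySem.Chars.join _ (pvRsplit1 _ _)) = String.ofList _
    rw [pv_last_step]
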